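-- pv_equiv track=rewrite | github.com/Motif-Based-Centralities/Centrality-Algorithms | parallel.py | copy_null_parts
-- ===== SOURCE A (Python) =====
-- def copy_null_parts(ref):
--     ref_copy = {}
--     for k in ref:
--         ref_copy[k] = {}
--         for m in ref[k]:
--             ref_copy[k][m] = {}
--             for n in ref[k][m]:
--                 ref_copy[k][m][n] = {}
--                 for o in ref[k][m][n]:
--                     ref_copy[k][m][n][o] = set(ref[k][m][n][o])
--     return ref_copy
-- ===== SOURCE B (Python) =====
-- def copy_null_parts(ref):
--     def rec(d, depth):
--         if depth == 0:
--             return set(d)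
--         return {k: rec(v, depth - 1) for k, v in d.items()}
--     return rec(ref, 4)
-- ===== Notes on version B (the rewrite author's own statement) =====
-- stated objective: simpler
-- what changed: Replaces the four hardcoded nested insert loops with a single depth-parameterized recursive helper (a dict comprehension per level, set() at depth 0).
import Mathlib
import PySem

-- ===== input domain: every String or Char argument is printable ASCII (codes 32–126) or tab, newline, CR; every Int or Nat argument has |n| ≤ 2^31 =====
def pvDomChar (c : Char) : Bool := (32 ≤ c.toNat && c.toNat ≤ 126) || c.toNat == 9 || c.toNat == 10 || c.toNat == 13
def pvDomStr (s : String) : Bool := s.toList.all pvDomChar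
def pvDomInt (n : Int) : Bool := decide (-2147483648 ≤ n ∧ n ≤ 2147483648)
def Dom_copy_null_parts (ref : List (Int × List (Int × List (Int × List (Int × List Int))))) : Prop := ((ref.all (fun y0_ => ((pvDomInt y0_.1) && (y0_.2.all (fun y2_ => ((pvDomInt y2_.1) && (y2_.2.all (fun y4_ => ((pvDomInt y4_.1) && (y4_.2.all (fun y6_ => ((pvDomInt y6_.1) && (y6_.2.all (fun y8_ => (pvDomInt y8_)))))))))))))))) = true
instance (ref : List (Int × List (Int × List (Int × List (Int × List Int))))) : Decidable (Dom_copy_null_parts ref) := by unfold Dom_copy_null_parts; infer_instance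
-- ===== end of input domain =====

-- B replaces A's four hardcoded nested insert loops with one recursive helper
-- parameterized by remaining depth (here: one polymorphic per-level map applied
-- four times, set() at depth 0); simpler decomposition, same cost.


-- ===== PORT A =====
-- literal transliteration: for each key insert a fresh inner dict built by the
-- inner loop (Python mutates the freshly inserted {} in place; building it
-- before the insert yields the same dict), set(...) at the innermost level
def copy_null_parts (ref : List (Int × List (Int × List (Int × List (Int × List Int))))) : List (Int × List (Int × List (Int × List (Int × List Int)))) :=
  ((PySem.Dict.ofList ref).items.foldl (fun c1 p1 =>
    c1.insert p1.1 (
      ((PySem.Dict.ofList p1.2).items.foldl (fun c2 p2 =>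
        c2.insert p2.1 (
          ((PySem.Dict.ofList p2.2).items.foldl (fun c3 p3 =>
            c3.insert p3.1 (
              ((PySem.Dict.ofList p3.2).items.foldl (fun c4 p4 =>
                c4.insert p4.1 (PySem.Set.ofList p4.2)) PySem.Dict.empty).items))
            PySem.Dict.empty).items))
        PySem.Dict.empty).items))
    PySem.Dict.empty).items

-- ===== PORT B =====
-- rec(d, depth) of Source B: depth 0 = set(d); depth > 0 = {k: rec(v, depth-1) for k, v in d.items()}.
-- Depth is a type-level quantity here, so the recursion unrolls into the
-- polymorphic one-level map pvMapVals applied once per depth level.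
def pvMapVals {α β : Type} (f : α → β) (d : List (Int × α)) : List (Int × β) :=
  (PySem.Dict.ofList d).items.map (fun kv => (kv.1, f kv.2))

def copy_null_parts_alt (ref : List (Int × List (Int × List (Int × List (Int × List Int))))) : List (Int × List (Int × List (Int × List (Int × List Int)))) :=
  pvMapVals (pvMapVals (pvMapVals (pvMapVals (fun leaf => PySem.Set.ofList leaf)))) ref

-- ===== PRECONDITION & SPEC =====
def Spec_copy_null_parts (ref : List (Int × List (Int × List (Int × List (Int × List Int))))) (out : List (Int × List (Int × List (Int × List (Int × List Int))))) : Prop := out = copy_null_parts_alt ref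
instance (ref : List (Int × List (Int × List (Int × List (Int × List Int))))) (out : List (Int × List (Int × List (Int × List (Int × List Int))))) : Decidable (Spec_copy_null_parts ref out) := by
  unfold Spec_copy_null_parts
  have i1 : DecidableEq (List (Int × List Int)) := inferInstance
  have i2 : DecidableEq (List (Int × List (Int × List Int))) := inferInstance
  have i3 : DecidableEq (List (Int × List (Int × List (Int × List Int)))) := inferInstance
  have i4 : DecidableEq (List (Int × List (Int × List (Int × List (Int × List Int))))) := inferInstance
  exact i4 out (copy_null_parts_alt ref)

-- ===== CLAIM (what is proved, stated in full; the proofs are below) =====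
def Claim_equal_copy_null_parts : Prop := ∀ (ref : List (Int × List (Int × List (Int × List (Int × List Int))))), Dom_copy_null_parts ref → Spec_copy_null_parts ref (copy_null_parts ref)

-- ===== LEMMAS AND PROOFS =====

-- an insert loop over the items of a dict (fresh, distinct keys) is a map over those items
theorem pv_fold_insert_eq_map {α β : Type} (f : α → β) (d : List (Int × α)) :
    ((PySem.Dict.ofList d).items.foldl (fun c p => c.insert p.1 (f p.2)) PySem.Dict.empty).items
      = pvMapVals f d := by
  have hnd : ((PySem.Dict.ofList d).items.map Prod.fst).Nodup := by
    have := PySem.Dict.nodup_keys_ofList (ps := d) (κ := Int) (ν := α)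
    simpa [PySem.Dict.keys] using this
  have h := PySem.Dict.items_foldl_insert_fresh
      (l := (PySem.Dict.ofList d).items) (k := Prod.fst) (v := fun p => f p.2)
      (d := (PySem.Dict.empty : PySem.Dict Int β))
      (by intro a _; simp [PySem.Dict.contains_empty]) hnd
  simpa [pvMapVals, PySem.Dict.empty] using h

theorem pvMapVals_congr {α β : Type} (f g : α → β) (d : List (Int × α)) (h : ∀ a, f a = g a) :
    pvMapVals f d = pvMapVals g d := by
  have : f = g := funext h
  rw [this]

theorem pv_level4 (d : List (Int × List Int)) :
    ((PySem.Dict.ofList d).items.foldl (fun c4 p4 =>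
        c4.insert p4.1 (PySem.Set.ofList p4.2)) PySem.Dict.empty).items
      = pvMapVals (fun leaf => PySem.Set.ofList leaf) d :=
  pv_fold_insert_eq_map (fun leaf => PySem.Set.ofList leaf) d

theorem pv_level3 (d : List (Int × List (Int × List Int))) :
    ((PySem.Dict.ofList d).items.foldl (fun c3 p3 =>
        c3.insert p3.1 (
          ((PySem.Dict.ofList p3.2).items.foldl (fun c4 p4 =>
            c4.insert p4.1 (PySem.Set.ofList p4.2)) PySem.Dict.empty).items))
      PySem.Dict.empty).items
      = pvMapVals (pvMapVals (fun leaf => PySem.Set.ofList leaf)) d :=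
  (pv_fold_insert_eq_map (fun x =>
      ((PySem.Dict.ofList x).items.foldl (fun c4 p4 =>
        c4.insert p4.1 (PySem.Set.ofList p4.2)) PySem.Dict.empty).items) d).trans
    (pvMapVals_congr _ _ d pv_level4)

theorem pv_level2 (d : List (Int × List (Int × List (Int × List Int)))) :
    ((PySem.Dict.ofList d).items.foldl (fun c2 p2 =>
        c2.insert p2.1 (
          ((PySem.Dict.ofList p2.2).items.foldl (fun c3 p3 =>
            c3.insert p3.1 (
              ((PySem.Dict.ofList p3.2).items.foldl (fun c4 p4 =>
                c4.insert p4.1 (PySem.Set.ofList p4.2)) PySem.Dict.empty).items))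
            PySem.Dict.empty).items))
      PySem.Dict.empty).items
      = pvMapVals (pvMapVals (pvMapVals (fun leaf => PySem.Set.ofList leaf))) d :=
  (pv_fold_insert_eq_map (fun x =>
      ((PySem.Dict.ofList x).items.foldl (fun c3 p3 =>
        c3.insert p3.1 (
          ((PySem.Dict.ofList p3.2).items.foldl (fun c4 p4 =>
            c4.insert p4.1 (PySem.Set.ofList p4.2)) PySem.Dict.empty).items))
        PySem.Dict.empty).items) d).trans
    (pvMapVals_congr _ _ d pv_level3)

theorem pv_level1 (d : List (Int × List (Int × List (Int × List (Int × List Int))))) :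
    copy_null_parts d = copy_null_parts_alt d := by
  unfold copy_null_parts copy_null_parts_alt
  exact (pv_fold_insert_eq_map (fun x =>
      ((PySem.Dict.ofList x).items.foldl (fun c2 p2 =>
        c2.insert p2.1 (
          ((PySem.Dict.ofList p2.2).items.foldl (fun c3 p3 =>
            c3.insert p3.1 (
              ((PySem.Dict.ofList p3.2).items.foldl (fun c4 p4 =>
                c4.insert p4.1 (PySem.Set.ofList p4.2)) PySem.Dict.empty).items))
            PySem.Dict.empty).items))
        PySem.Dict.empty).items) d).trans
    (pvMapVals_congr _ _ d pv_level2)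

-- ===== VERDICT (by name: the statement is the Claim_ definition above) =====
theorem copy_null_parts_spec : Claim_equal_copy_null_parts :=
  fun ref _ => pv_level1 ref
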